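-- pv_equiv track=rewrite | github.com/hntruc/Pacman-Game | pacman.py | check_step
-- ===== SOURCE A (Python) =====
-- def check_step(ex, step):
--     index = -1
--     for i in range(len(step)):
--         if step[i] not in ex:
--             index = i
--             return index
--     times = [ex.count(step[i]) for i in range(len(step))]
--     return times.index(min(times))
-- ===== SOURCE B (Python) =====
-- def check_step(ex, step):
--     # One hash-count table built once, then a single first-argmin pass over the
--     # indices: an element absent from ex has count 0, which is necessarily the
--     # least count, so one reduction covers both of A's phases.
--     counts = {}
--     for x in ex:
--         counts[x] = counts.get(x, 0) + 1
--     return min(range(len(step)), key=lambda i: counts.get(step[i], 0))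
-- ===== Notes on version B (the rewrite author's own statement) =====
-- stated objective: faster
-- what changed: Replaces A's two phases (a linear-membership scan for the first element missing from ex, then a full ex.count table plus min plus index scans) with one hash-count dict built in a single pass over ex followed by a single first-argmin reduction over the indices of step, correct because a missing element's count 0 is necessarily the least count.
import Mathlib
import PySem

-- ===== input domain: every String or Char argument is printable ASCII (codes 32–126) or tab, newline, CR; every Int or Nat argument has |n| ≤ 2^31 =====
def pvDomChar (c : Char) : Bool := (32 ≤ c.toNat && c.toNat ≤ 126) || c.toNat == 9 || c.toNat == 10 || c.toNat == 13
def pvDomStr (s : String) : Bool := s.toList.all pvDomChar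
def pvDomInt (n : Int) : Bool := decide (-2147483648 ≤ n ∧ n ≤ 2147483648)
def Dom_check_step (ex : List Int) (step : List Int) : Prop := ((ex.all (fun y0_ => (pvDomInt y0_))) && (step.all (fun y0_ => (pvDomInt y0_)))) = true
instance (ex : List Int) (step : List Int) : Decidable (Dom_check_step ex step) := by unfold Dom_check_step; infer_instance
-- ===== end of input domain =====

-- B builds one hash-count table of ex, then takes a single first-argmin over the
-- indices of step (a missing element's count 0 is necessarily the least count, so
-- one reduction covers both of A's phases).

-- ===== PORT A =====
-- the 'for i in range(len(step)): if step[i] not in ex: return i' loop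
-- (i ranges over valid indices, so pyGetD's default 0 is never used)
def csA_loop (ex step : List Int) : List Int → Option Int
  | [] => none
  | i :: rest => if PySem.List.pyGetD step i 0 ∈ ex then csA_loop ex step rest else some i

def check_step (ex : List Int) (step : List Int) : Int :=
  match csA_loop ex step (PySem.List.pyRange 0 (step.length : Int) 1) with
  | some i => i
  | none =>
    let times : List Int := (PySem.List.pyRange 0 (step.length : Int) 1).map
      (fun i => (PySem.List.count ex (PySem.List.pyGetD step i 0) : Int))
    match PySem.List.min? times (fun x => x) with
    | none => 0 -- unreachable under Pre_: here step = [] and Python's min([]) raises ValueError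
    | some m =>
      match PySem.List.index? times m with
      | none => 0 -- unreachable: m is an element of times
      | some k => (k : Int)

-- ===== PORT B =====
def check_step_alt (ex : List Int) (step : List Int) : Int :=
  let counts : PySem.Dict Int Int :=
    ex.foldl (fun d x => d.insert x (d.getD x 0 + 1)) PySem.Dict.empty
  match PySem.List.min? (PySem.List.pyRange 0 (step.length : Int) 1)
      (fun i => counts.getD (PySem.List.pyGetD step i 0) 0) with
  | none => 0 -- unreachable under Pre_: here step = [] and Python's min raises ValueError
  | some i => i

-- ===== PRECONDITION & SPEC =====
-- Pre_ excludes exactly step = [], where both A and B raise ValueError (min of an empty sequence).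
def Pre_check_step (ex : List Int) (step : List Int) : Prop := step ≠ []
instance (ex : List Int) (step : List Int) : Decidable (Pre_check_step ex step) := by
  unfold Pre_check_step; infer_instance
def pvWitness_check_step : List Int × List Int := ([1, 2], [2, 3])

def Spec_check_step (ex : List Int) (step : List Int) (out : Int) : Prop := out = check_step_alt ex step
instance (ex : List Int) (step : List Int) (out : Int) : Decidable (Spec_check_step ex step out) := by unfold Spec_check_step; infer_instance

-- ===== CLAIM (what is proved, stated in full; the proofs are below) =====
def Claim_equal_check_step : Prop := ∀ (ex : List Int) (step : List Int), Dom_check_step ex step → Pre_check_step ex step → Spec_check_step ex step (check_step ex step)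

-- ===== LEMMAS AND PROOFS =====

-- the Int-valued count key both ports use
def csKey (ex step : List Int) (i : Int) : Int :=
  (PySem.List.count ex (PySem.List.pyGetD step i 0) : Int)

-- range(n) as a list of Ints, built back-to-front
def csR : Nat → List Int
  | 0 => []
  | n + 1 => csR n ++ [((n : Nat) : Int)]

theorem csR_eq_map (n : Nat) : csR n = (List.range n).map (Nat.cast : Nat → Int) := by
  induction n with
  | zero => simp [csR]
  | succ n ih => simp [csR, List.range_succ, ih]

theorem pyRange_eq_csR (n : Nat) : PySem.List.pyRange 0 (n : Int) 1 = csR n := by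
  rw [csR_eq_map, PySem.List.pyRange_of_pos 0 (n : Int) Int.one_pos]
  rcases Nat.eq_zero_or_pos n with h | h
  · subst h; simp
  · have hlt : (0 : Int) < (n : Int) := by exact_mod_cast h
    rw [if_pos hlt]
    have h2 : (((n : Int) - 0 + 1 - 1) / 1).toNat = n := by simp
    rw [h2]
    exact List.map_congr_left (fun a _ => by omega)

theorem min?_append_singleton {α κ : Type} [LT κ] [DecidableLT κ]
    (l : List α) (x : α) (key : α → κ) :
    PySem.List.min? (l ++ [x]) key =
      match PySem.List.min? l key with
      | none => some x
      | some m => if key x < key m then some x else some m := by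
  unfold PySem.List.min?
  rw [List.foldl_append]
  cases List.foldl
      (fun acc x =>
        match acc with
        | none => some x
        | some m => if key x < key m then some x else some m)
      none l <;> rfl

theorem min?_append_some {α κ : Type} [LT κ] [DecidableLT κ]
    {l : List α} {m : α} (x : α) (key : α → κ)
    (h : PySem.List.min? l key = some m) :
    PySem.List.min? (l ++ [x]) key = if key x < key m then some x else some m := by
  rw [min?_append_singleton, h]

theorem csA_loop_append (ex step : List Int) (l : List Int) (x : Int) :
    csA_loop ex step (l ++ [x]) =
      match csA_loop ex step l with
      | some i => some i
      | none => if PySem.List.pyGetD step x 0 ∈ ex then none else some x := by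
  induction l with
  | nil => simp [csA_loop]
  | cons a t ih =>
    by_cases h : PySem.List.pyGetD step a 0 ∈ ex
    · simpa [csA_loop, h] using ih
    · simp [csA_loop, h]

theorem csA_loop_append_none {ex step l : List Int} (x : Int)
    (h : csA_loop ex step l = none) :
    csA_loop ex step (l ++ [x]) =
      if PySem.List.pyGetD step x 0 ∈ ex then none else some x := by
  rw [csA_loop_append, h]

theorem csA_loop_append_some {ex step l : List Int} {i : Int} (x : Int)
    (h : csA_loop ex step l = some i) :
    csA_loop ex step (l ++ [x]) = some i := by
  rw [csA_loop_append, h]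

-- membership in ex ↔ the count key is nonzero
theorem mem_iff_key_ne (ex step : List Int) (x : Int) :
    PySem.List.pyGetD step x 0 ∈ ex ↔ csKey ex step x ≠ 0 := by
  simp [csKey, PySem.List.count_eq, List.count_eq_zero]

theorem csKey_nonneg (ex step : List Int) (x : Int) : 0 ≤ csKey ex step x := by
  simp [csKey]

-- the main invariant: a single index k is the first argmin of the count key,
-- and it determines every intermediate value of both ports
theorem cs_invariant (ex step : List Int) :
    ∀ n : Nat, 1 ≤ n → ∃ k : Nat, k < n ∧
      (∀ j : Nat, j < n → csKey ex step (k : Int) ≤ csKey ex step (j : Int)) ∧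
      PySem.List.min? (csR n) (csKey ex step) = some ((k : Nat) : Int) ∧
      csA_loop ex step (csR n) =
        (if csKey ex step (k : Int) = 0 then some ((k : Nat) : Int) else none) ∧
      PySem.List.min? ((csR n).map (csKey ex step)) (fun x => x)
        = some (csKey ex step (k : Int)) ∧
      PySem.List.index? ((csR n).map (csKey ex step)) (csKey ex step (k : Int)) = some k := by
  intro n hn
  induction n with
  | zero => omega
  | succ n ih =>
    rcases Nat.eq_zero_or_pos n with h0 | h1
    · -- base case n+1 = 1
      subst h0
      refine ⟨0, by omega, ?_, ?_, ?_, ?_, ?_⟩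
      · intro j hj; interval_cases j; exact le_refl _
      · simp [csR, PySem.List.min?]
      · have h1 : csR 1 = [((0 : Nat) : Int)] := by simp [csR]
        rw [h1]
        simp only [csA_loop]
        by_cases hm : PySem.List.pyGetD step ((0 : Nat) : Int) 0 ∈ ex
        · rw [if_pos hm, if_neg ((mem_iff_key_ne ex step _).mp hm)]
        · rw [if_neg hm,
            if_pos (by by_contra hc; exact hm ((mem_iff_key_ne ex step _).mpr hc))]
      · simp [csR, PySem.List.min?]
      · simp [csR]
    · -- inductive step, with csR (n+1) = csR n ++ [n]
      obtain ⟨k, hk, hmin, hb, hloop, htmin, hidx⟩ := ih h1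
      by_cases hnew : csKey ex step (n : Int) < csKey ex step (k : Int)
      · -- new last element has a strictly smaller key: the argmin moves to n
        have hnotmem : csKey ex step (n : Int) ∉ (csR n).map (csKey ex step) := by
          intro hmem
          rw [csR_eq_map, List.map_map] at hmem
          rcases List.mem_map.mp hmem with ⟨j, hj, hkey⟩
          have := hmin j (List.mem_range.mp hj)
          simp only [Function.comp] at hkey
          omega
        have hkne : csKey ex step (k : Int) ≠ 0 := by
          have := csKey_nonneg ex step (n : Int); omega
        have hl : csA_loop ex step (csR n) = none := by rw [hloop, if_neg hkne]
        refine ⟨n, by omega, ?_, ?_, ?_, ?_, ?_⟩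
        · intro j hj
          rcases Nat.lt_succ_iff_lt_or_eq.mp hj with hj' | rfl
          · exact le_of_lt (lt_of_lt_of_le hnew (hmin j hj'))
          · exact le_refl _
        · rw [show csR (n + 1) = csR n ++ [((n : Nat) : Int)] from rfl,
            min?_append_some _ _ hb, if_pos hnew]
        · rw [show csR (n + 1) = csR n ++ [((n : Nat) : Int)] from rfl,
            csA_loop_append_none _ hl]
          by_cases hnz : csKey ex step (n : Int) = 0
          · rw [if_neg (fun hm => (mem_iff_key_ne ex step _).mp hm hnz), if_pos hnz]
          · rw [if_pos ((mem_iff_key_ne ex step _).mpr hnz), if_neg hnz]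
        · rw [show csR (n + 1) = csR n ++ [((n : Nat) : Int)] from rfl,
            List.map_append, List.map_singleton,
            min?_append_some _ _ htmin, if_pos hnew]
        · rw [show csR (n + 1) = csR n ++ [((n : Nat) : Int)] from rfl,
            List.map_append, List.map_singleton,
            PySem.List.index?_append_singleton_self _ _ hnotmem]
          simp [csR_eq_map]
      · -- the old k stays the first argmin
        refine ⟨k, by omega, ?_, ?_, ?_, ?_, ?_⟩
        · intro j hj
          rcases Nat.lt_succ_iff_lt_or_eq.mp hj with hj' | rfl
          · exact hmin j hj'
          · omega
        · rw [show csR (n + 1) = csR n ++ [((n : Nat) : Int)] from rfl,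
            min?_append_some _ _ hb, if_neg hnew]
        · rw [show csR (n + 1) = csR n ++ [((n : Nat) : Int)] from rfl]
          by_cases hz : csKey ex step (k : Int) = 0
          · have hl : csA_loop ex step (csR n) = some ((k : Nat) : Int) := by
              rw [hloop, if_pos hz]
            rw [csA_loop_append_some _ hl, if_pos hz]
          · have hl : csA_loop ex step (csR n) = none := by rw [hloop, if_neg hz]
            have hnz : csKey ex step (n : Int) ≠ 0 := by
              have h1 := csKey_nonneg ex step ((k : Nat) : Int)
              have h2 := csKey_nonneg ex step ((n : Nat) : Int)
              omega
            rw [csA_loop_append_none _ hl, if_neg hz,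
              if_pos ((mem_iff_key_ne ex step _).mpr hnz)]
        · rw [show csR (n + 1) = csR n ++ [((n : Nat) : Int)] from rfl,
            List.map_append, List.map_singleton,
            min?_append_some _ _ htmin, if_neg hnew]
        · have hmem : csKey ex step ((k : Nat) : Int) ∈ (csR n).map (csKey ex step) := by
            apply List.mem_map_of_mem
            rw [csR_eq_map]
            exact List.mem_map.mpr ⟨k, List.mem_range.mpr hk, rfl⟩
          rw [show csR (n + 1) = csR n ++ [((n : Nat) : Int)] from rfl,
            List.map_append,
            PySem.List.index?_append_of_mem _ hmem, hidx]

-- ===== VERDICT (by name: the statement is the Claim_ definition above) =====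
theorem check_step_spec : Claim_equal_check_step := by
  intro ex step _ hpre
  unfold Spec_check_step check_step check_step_alt
  have hn : 1 ≤ step.length := List.length_pos_iff.mpr hpre
  obtain ⟨k, hk, hmin, hb, hloop, htmin, hidx⟩ := cs_invariant ex step step.length hn
  rw [pyRange_eq_csR]
  have hkey : (fun i => (PySem.Dict.counter ex).getD (PySem.List.pyGetD step i 0) 0)
      = csKey ex step := by
    funext i
    rw [PySem.Dict.getD_counter]
    simp [csKey, PySem.List.count_eq]
  show (match csA_loop ex step (csR step.length) with
    | some i => i
    | none =>
      match PySem.List.min? ((csR step.length).map (csKey ex step)) (fun x => x) with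
      | none => 0
      | some m =>
        match PySem.List.index? ((csR step.length).map (csKey ex step)) m with
        | none => 0
        | some k => (k : Int)) =
    match PySem.List.min? (csR step.length)
        (fun i => (PySem.Dict.counter ex).getD (PySem.List.pyGetD step i 0) 0) with
    | none => 0
    | some i => i
  rw [hkey]
  by_cases hz : csKey ex step (k : Int) = 0
  · simp only [hloop, hb, if_pos hz]
  · simp only [hloop, hb, htmin, hidx, if_neg hz]
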